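-- pv_equiv track=rewrite | github.com/puzzlelib/PuzzleLib | Datasets/Utils.py | merge2D
-- ===== SOURCE A (Python) =====
-- def merge2D(data):
-- 	mesh = [0] * len(data)
-- 	res = []
-- 	cnt = 0
--
-- 	for i, item in enumerate(data):
-- 		res += item
-- 		mesh[i] = {"x1": cnt, "x2": cnt+len(item)}
-- 		cnt += len(item)
--
-- 	return res, mesh
-- ===== SOURCE B (Python) =====
-- def merge2D(data):
-- 	res = [x for item in data for x in item]
-- 	mesh = []
-- 	end = len(res)
-- 	for item in reversed(data):
-- 		mesh.append({"x1": end - len(item), "x2": end})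
-- 		end -= len(item)
-- 	mesh.reverse()
-- 	return res, mesh
-- ===== Notes on version B (the rewrite author's own statement) =====
-- stated objective: alternative
-- what changed: B flattens once with a comprehension and then builds the mesh BACK-TO-FRONT: it walks the data in reverse, deriving each block's boundaries from a descending end offset that starts at the total length, and reverses the mesh at the end, instead of A's forward pass that mutates a preallocated mesh with an ascending start counter.
import Mathlib
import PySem

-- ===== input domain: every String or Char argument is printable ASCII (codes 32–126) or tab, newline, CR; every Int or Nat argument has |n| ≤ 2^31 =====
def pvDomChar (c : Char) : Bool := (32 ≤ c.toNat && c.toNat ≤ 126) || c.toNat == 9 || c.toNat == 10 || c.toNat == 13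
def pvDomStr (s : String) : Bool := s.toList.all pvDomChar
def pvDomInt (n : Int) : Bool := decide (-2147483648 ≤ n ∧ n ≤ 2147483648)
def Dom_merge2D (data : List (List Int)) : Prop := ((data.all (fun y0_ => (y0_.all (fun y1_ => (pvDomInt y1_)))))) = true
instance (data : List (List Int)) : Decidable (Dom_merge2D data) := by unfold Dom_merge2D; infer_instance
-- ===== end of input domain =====

-- B flattens once and then builds the mesh back-to-front from a descending end offset;
-- A mutates a preallocated mesh forward with an ascending counter (objective: alternative).

-- ===== PORT A =====
-- A preallocates mesh = [0]*len(data) and assigns mesh[i]; every placeholder is overwritten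
-- before return, so the placeholder is [] of the element type here (set at index i).
def merge2D (data : List (List Int)) : List Int × (List (List (String × Int))) :=
  let mesh0 : List (List (String × Int)) := List.replicate data.length []
  let st := (PySem.List.enumerate data 0).foldl
    (fun (st : List Int × List (List (String × Int)) × Int) (p : Int × List Int) =>
      (st.1 ++ p.2,
       (st.2.1).set p.1.toNat [("x1", st.2.2), ("x2", st.2.2 + (p.2.length : Int))],
       st.2.2 + (p.2.length : Int)))
    ([], mesh0, 0)
  (st.1, st.2.1)

-- ===== PORT B =====
def merge2D_alt (data : List (List Int)) : List Int × (List (List (String × Int))) :=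
  let res := data.flatMap (fun item => item)      -- [x for item in data for x in item]
  let st := data.reverse.foldl                    -- for item in reversed(data): append; end -= len
    (fun (st : List (List (String × Int)) × Int) (item : List Int) =>
      (st.1 ++ [[("x1", st.2 - (item.length : Int)), ("x2", st.2)]], st.2 - (item.length : Int)))
    ([], (res.length : Int))
  (res, st.1.reverse)                             -- mesh.reverse()

-- ===== PRECONDITION & SPEC =====
def Spec_merge2D (data : List (List Int)) (out : List Int × (List (List (String × Int)))) : Prop := out = merge2D_alt data
instance (data : List (List Int)) (out : List Int × (List (List (String × Int)))) : Decidable (Spec_merge2D data out) := by unfold Spec_merge2D; infer_instance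

-- ===== CLAIM (what is proved, stated in full; the proofs are below) =====
def Claim_equal_merge2D : Prop := ∀ (data : List (List Int)), Dom_merge2D data → Spec_merge2D data (merge2D data)

-- ===== LEMMAS AND PROOFS =====

-- the mesh both programs compute, written structurally with a running offset c
def meshFrom (c : Int) : List (List Int) → List (List (String × Int))
  | [] => []
  | x :: xs => [("x1", c), ("x2", c + (x.length : Int))] :: meshFrom (c + (x.length : Int)) xs

lemma set_middle {α : Type} (pre suf : List α) (a v : α) :
    (pre ++ a :: suf).set pre.length v = pre ++ v :: suf := by
  induction pre with
  | nil => simp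
  | cons h t ih => simp [ih]

lemma loopA (data : List (List Int)) (pre : List (List (String × Int))) (res0 : List Int) (c : Int) :
    (PySem.List.enumerate data (pre.length : Int)).foldl
      (fun (st : List Int × List (List (String × Int)) × Int) (p : Int × List Int) =>
        (st.1 ++ p.2,
         (st.2.1).set p.1.toNat [("x1", st.2.2), ("x2", st.2.2 + (p.2.length : Int))],
         st.2.2 + (p.2.length : Int)))
      (res0, pre ++ List.replicate data.length [], c)
    = (res0 ++ data.flatten, pre ++ meshFrom c data, c + (data.flatten.length : Int)) := by
  induction data generalizing pre res0 c with
  | nil => simp [PySem.List.enumerate_nil, meshFrom]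
  | cons x xs ih =>
    rw [PySem.List.enumerate_cons]
    simp only [List.foldl_cons, List.length_cons, List.replicate_succ]
    have hset : (pre ++ ([] : List (String × Int)) :: List.replicate xs.length []).set
        ((pre.length : Int)).toNat [("x1", c), ("x2", c + (x.length : Int))]
        = (pre ++ [[("x1", c), ("x2", c + (x.length : Int))]]) ++ List.replicate xs.length [] := by
      rw [Int.toNat_natCast, set_middle]; simp
    simp only [hset]
    have hlen : ((pre ++ [[("x1", c), ("x2", c + (x.length : Int))]]).length : Int)
        = (pre.length : Int) + 1 := by simp
    rw [← hlen, ih]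
    simp [meshFrom]
    omega

-- B's reversed loop, read as a foldr over data: it produces the mesh in reverse order
-- together with the descending offset it ends at
lemma loopB (data : List (List Int)) (e : Int) :
    data.foldr
      (fun (item : List Int) (st : List (List (String × Int)) × Int) =>
        (st.1 ++ [[("x1", st.2 - (item.length : Int)), ("x2", st.2)]], st.2 - (item.length : Int)))
      ([], e)
    = ((meshFrom (e - (data.flatten.length : Int)) data).reverse,
       e - (data.flatten.length : Int)) := by
  induction data with
  | nil => simp [meshFrom]
  | cons x xs ih =>
    simp only [List.foldr_cons, ih, meshFrom, List.flatten_cons, List.length_append,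
      List.reverse_cons]
    have h1 : e - ((x.length + xs.flatten.length : Nat) : Int) + (x.length : Int)
        = e - (xs.flatten.length : Int) := by push_cast; ring
    have h2 : e - (xs.flatten.length : Int) - (x.length : Int)
        = e - ((x.length + xs.flatten.length : Nat) : Int) := by push_cast; ring
    rw [h2, h1]

-- ===== VERDICT (by name: the statement is the Claim_ definition above) =====
theorem merge2D_spec : Claim_equal_merge2D := by
  intro data _
  show merge2D data = merge2D_alt data
  unfold merge2D merge2D_alt
  have hA := loopA data [] [] 0
  simp only [List.length_nil, Int.natCast_zero, List.nil_append] at hA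
  have hB := loopB data ((data.flatMap (fun item => item)).length : Int)
  simp only [List.foldl_reverse] at *
  have hfl : data.flatMap (fun item => item) = data.flatten := by simp
  rw [hfl] at hB
  rw [hA, hfl, hB]
  simp
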